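-- pv_equiv track=rewrite | github.com/tlijkkkk/mark_v | leetcode-practice/leetcode_practice/others/leetcode556_next_greater_element_3.py | next_greater_element_iii
-- ===== SOURCE A (Python) =====
-- def next_greater_element_iii(n: int) -> int:
--     n_str = list(str(n))  # convert to list so we can swap
--
--     if not n_str:
--         return -1
--
--     change_idx = -1
--     for i in range(len(n_str) - 2, -1, -1):
--         if n_str[i] < n_str[i + 1]:
--             change_idx = i
--             break  # only need the first one from right
--
--     if change_idx == -1:
--         return -1
--
--     min_next = change_idx + 1
--     for i in range(change_idx + 1, len(n_str)):
--         if n_str[i] > n_str[change_idx] and n_str[i] <= n_str[min_next]: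
--             min_next = i
--
--     # Swap
--     n_str[change_idx], n_str[min_next] = n_str[min_next], n_str[change_idx]
--
--     # Sort the suffix
--     suffix = sorted(n_str[change_idx + 1:])
--     result_digits = n_str[:change_idx + 1] + suffix
--     result = int("".join(result_digits))
--
--     return result if result <= 2**31 - 1 else -1
-- ===== SOURCE B (Python) =====
-- def next_greater_element_iii(n: int) -> int:
--     s = str(n)
--     # walk from the right end past the non-increasing tail to find the pivot
--     i = len(s) - 1
--     while i > 0 and s[i - 1] >= s[i]:
--         i -= 1
--     if i <= 0:
--         return -1  # already the largest arrangement
--     pivot = s[i - 1]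
--     counts = {}
--     for c in s[i:]:
--         counts[c] = counts.get(c, 0) + 1
--     succ = min(c for c in counts if c > pivot)
--     counts[succ] -= 1
--     counts[pivot] = counts.get(pivot, 0) + 1
--     tail = "".join(c * counts[c] for c in sorted(counts))
--     result = int(s[: i - 1] + succ + tail)
--     return result if result <= 2**31 - 1 else -1
-- ===== Notes on version B (the rewrite author's own statement) =====
-- stated objective: alternative
-- what changed: A finds the swap partner with a min-tracking index scan, swaps in place and sorts the suffix; B walks off the non-increasing tail to the pivot, builds a digit counter of the suffix, takes the smallest counted key above the pivot as successor and rebuilds the tail from the adjusted counts (counting sort) instead of swapping and sorting.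
import Mathlib
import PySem

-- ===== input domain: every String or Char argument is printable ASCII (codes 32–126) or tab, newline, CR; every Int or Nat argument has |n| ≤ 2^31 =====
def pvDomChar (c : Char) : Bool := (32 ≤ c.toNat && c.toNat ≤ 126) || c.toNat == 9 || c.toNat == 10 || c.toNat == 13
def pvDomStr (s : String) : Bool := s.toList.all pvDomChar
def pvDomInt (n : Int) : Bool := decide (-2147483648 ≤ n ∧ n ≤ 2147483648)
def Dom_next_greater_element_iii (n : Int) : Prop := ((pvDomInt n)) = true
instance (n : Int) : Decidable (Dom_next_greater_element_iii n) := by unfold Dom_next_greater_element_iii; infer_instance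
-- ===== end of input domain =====

-- B replaces A's min-tracking scan + swap + suffix sort by a pivot walk plus a digit counter
-- (successor = min counted key above the pivot, new suffix rebuilt from the counts); objective: alternative.

-- ===== PORT A =====
-- Literal port of A.  The 'for … break' pivot search is a fold whose Option state freezes once
-- set; int("".join(…)) is PySem.Int.ofChars? — Python raises ValueError exactly where it is
-- none (excluded by Pre_), the port returns -1 there.
def next_greater_element_iii (n : Int) : Int :=
  let n_str := PySem.Int.toChars n
  if n_str = [] then -1
  else
    let change_idx :=
      (PySem.List.pyRange ((n_str.length : Int) - 2) (-1) (-1)).foldl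
        (fun acc i =>
          match acc with
          | some j => some j
          | none =>
            if PySem.List.pyGetD n_str i ' ' < PySem.List.pyGetD n_str (i + 1) ' ' then some i
            else none)
        none
    match change_idx with
    | none => -1
    | some c =>
      let min_next :=
        (PySem.List.pyRange (c + 1) (n_str.length : Int) 1).foldl
          (fun m i =>
            if PySem.List.pyGetD n_str c ' ' < PySem.List.pyGetD n_str i ' ' ∧
                PySem.List.pyGetD n_str i ' ' ≤ PySem.List.pyGetD n_str m ' ' then i
            else m)
          (c + 1)
      let a := PySem.List.pyGetD n_str c ' '
      let b := PySem.List.pyGetD n_str min_next ' '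
      let swapped := PySem.List.pySetD (PySem.List.pySetD n_str c b) min_next a
      let suffix := PySem.List.sorted (PySem.List.slice swapped (some (c + 1)) none) (fun x => x) false
      let result_digits := PySem.List.slice swapped none (some (c + 1)) ++ suffix
      match PySem.Int.ofChars? result_digits with
      | none => -1  -- int() raises ValueError here (excluded by Pre_)
      | some result => if result ≤ 2 ^ 31 - 1 then result else -1

-- ===== PORT B =====
-- 'i = len(s) - 1; while i > 0 and s[i-1] >= s[i]: i -= 1' — structural recursion on i
-- (for the empty string the loop never runs and i = -1 ≤ 0, covered by the length-0 branch below).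
def pivotWalk (s : List Char) : Nat → Nat
  | 0 => 0
  | k + 1 =>
    if PySem.List.pyGetD s ((k : Int) + 1) ' ' ≤ PySem.List.pyGetD s (k : Int) ' ' then pivotWalk s k
    else k + 1

-- Literal port of B (Source B): counter over the suffix, successor = min counted key above the
-- pivot (Python's min() raises on an empty generator — unreachable while i > 0 — the port
-- returns -1 on that dead branch), tail rebuilt from the sorted counter keys;
-- int(…) is PySem.Int.ofChars?, none exactly where Python raises ValueError (excluded by Pre_).
def next_greater_element_iii_alt (n : Int) : Int :=
  let s := PySem.Int.toChars n
  let i : Nat := if s.length = 0 then 0 else pivotWalk s (s.length - 1)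
  if i = 0 then -1
  else
    let pivot := PySem.List.pyGetD s ((i : Int) - 1) ' '
    let counts := (PySem.List.slice s (some (i : Int)) none).foldl
        (fun d c => d.insert c (d.getD c 0 + 1)) (PySem.Dict.empty : PySem.Dict Char Int)
    match PySem.List.min? (counts.keys.filter (fun c => decide (pivot < c))) (fun c => c) with
    | none => -1
    | some succ =>
      let counts1 := counts.insert succ (counts.getD succ 0 - 1)
      let counts2 := counts1.insert pivot (counts1.getD pivot 0 + 1)
      let tail := (PySem.List.sorted counts2.keys (fun c => c) false).flatMap
          (fun c => List.replicate (counts2.getD c 0).toNat c)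
      match PySem.Int.ofChars? (PySem.List.slice s none (some ((i : Int) - 1)) ++ [succ] ++ tail) with
      | none => -1  -- int() raises ValueError here (excluded by Pre_)
      | some result => if result ≤ 2 ^ 31 - 1 then result else -1

-- ===== PRECONDITION & SPEC =====
-- Pre_ excludes exactly the inputs on which A raises ValueError and returns nothing: negative n
-- whose digit string is non-increasing, where A swaps the '-' sign into the middle of the string
-- before calling int() (B's Python raises the same ValueError there).
def Pre_next_greater_element_iii (n : Int) : Prop :=
  0 ≤ n ∨ ¬ (PySem.Int.toChars (-n)).Pairwise (fun a b => b ≤ a)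

instance (n : Int) : Decidable (Pre_next_greater_element_iii n) := by
  unfold Pre_next_greater_element_iii; infer_instance

def pvWitness_next_greater_element_iii : Int := 230241

def Spec_next_greater_element_iii (n : Int) (out : Int) : Prop := out = next_greater_element_iii_alt n
instance (n : Int) (out : Int) : Decidable (Spec_next_greater_element_iii n out) := by unfold Spec_next_greater_element_iii; infer_instance

-- ===== CLAIM (what is proved, stated in full; the proofs are below) =====
def Claim_equal_next_greater_element_iii : Prop := ∀ (n : Int), Dom_next_greater_element_iii n → Pre_next_greater_element_iii n → Spec_next_greater_element_iii n (next_greater_element_iii n)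

-- ===== LEMMAS AND PROOFS =====

-- the frozen-Option fold of port A is a first-match search
theorem pvFoldlFreeze_some {p : Int → Prop} [DecidablePred p] (l : List Int) (j : Int) :
    l.foldl
      (fun acc i =>
        match acc with
        | some j => some j
        | none => if p i then some i else none) (some j) = some j := by
  induction l with
  | nil => rfl
  | cons x t ih => simpa using ih

theorem pvFoldlFreeze {p : Int → Prop} [DecidablePred p] (l : List Int) :
    l.foldl
      (fun acc i =>
        match acc with
        | some j => some j
        | none => if p i then some i else none) none
      = l.find? (fun i => decide (p i)) := by
  induction l with
  | nil => rfl
  | cons x t ih =>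
    by_cases hx : p x
    · simp [hx, pvFoldlFreeze_some]
    · simpa [hx] using ih

-- A's downward pivot search and B's pivot walk stop at the same place
theorem pvPivotBridge (s : List Char) (k : Nat) :
    (PySem.List.pyRange ((k : Int) - 1) (-1) (-1)).find?
        (fun i => decide (PySem.List.pyGetD s i ' ' < PySem.List.pyGetD s (i + 1) ' '))
      = if pivotWalk s k = 0 then none else some ((pivotWalk s k : Int) - 1) := by
  induction k with
  | zero => simp [PySem.List.pyRange_neg_one_eq_nil, pivotWalk]
  | succ k ih =>
    have hcast : ((k + 1 : Nat) : Int) - 1 = (k : Int) := by push_cast; ring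
    rw [hcast, PySem.List.pyRange_neg_one_cons (by omega : (-1 : Int) < (k : Int))]
    by_cases hle : PySem.List.pyGetD s ((k : Int) + 1) ' ' ≤ PySem.List.pyGetD s (k : Int) ' '
    · have hpw : pivotWalk s (k + 1) = pivotWalk s k := by
        simp only [pivotWalk]; rw [if_pos hle]
      rw [List.find?_cons_of_neg (by simpa using not_lt.mpr hle), ih, hpw]
    · have hpw : pivotWalk s (k + 1) = k + 1 := by
        simp only [pivotWalk]; rw [if_neg hle]
      rw [List.find?_cons_of_pos (by simpa using lt_of_not_ge hle), hpw]
      simp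

-- invariant of A's min_next fold
theorem pvMinNextSpec (s : List Char) (c : Nat) (hc1 : c + 1 < s.length)
    (hasc : PySem.List.pyGetD s (c : Int) ' ' < PySem.List.pyGetD s ((c : Int) + 1) ' ') :
    ∃ m : Int, (c : Int) + 1 ≤ m ∧ m < s.length ∧
      ((PySem.List.pyRange ((c : Int) + 1) (s.length : Int) 1).foldl
        (fun m i =>
          if PySem.List.pyGetD s (c : Int) ' ' < PySem.List.pyGetD s i ' ' ∧
              PySem.List.pyGetD s i ' ' ≤ PySem.List.pyGetD s m ' ' then i
          else m) ((c : Int) + 1)) = m ∧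
      PySem.List.pyGetD s (c : Int) ' ' < PySem.List.pyGetD s m ' ' ∧
      (∀ j : Int, (c : Int) + 1 ≤ j → j < s.length →
        PySem.List.pyGetD s (c : Int) ' ' < PySem.List.pyGetD s j ' ' →
        PySem.List.pyGetD s m ' ' ≤ PySem.List.pyGetD s j ' ') := by
  have main : ∀ b : Nat, c + 1 ≤ b → b ≤ s.length →
      ∃ m : Int, (c : Int) + 1 ≤ m ∧ m < s.length ∧
        ((PySem.List.pyRange ((c : Int) + 1) (b : Int) 1).foldl
          (fun m i =>
            if PySem.List.pyGetD s (c : Int) ' ' < PySem.List.pyGetD s i ' ' ∧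
                PySem.List.pyGetD s i ' ' ≤ PySem.List.pyGetD s m ' ' then i
            else m) ((c : Int) + 1)) = m ∧
        PySem.List.pyGetD s (c : Int) ' ' < PySem.List.pyGetD s m ' ' ∧
        (∀ j : Int, (c : Int) + 1 ≤ j → j < (b : Int) →
          PySem.List.pyGetD s (c : Int) ' ' < PySem.List.pyGetD s j ' ' →
          PySem.List.pyGetD s m ' ' ≤ PySem.List.pyGetD s j ' ') := by
    intro b
    induction b with
    | zero => intro h; omega
    | succ b ihb =>
      intro hb hble
      by_cases hbc : b < c + 1
      · -- b + 1 = c + 1 : empty range, m is the initial value c + 1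
        have hb1 : b + 1 = c + 1 := by omega
        refine ⟨(c : Int) + 1, le_refl _, by exact_mod_cast hc1, ?_, ?_, ?_⟩
        · rw [show ((b + 1 : Nat) : Int) = (c : Int) + 1 by omega,
            PySem.List.pyRange_one_eq_nil (le_refl _)]
          rfl
        · exact hasc
        · intro j hj1 hj2 _
          have : ((b + 1 : Nat) : Int) = (c : Int) + 1 := by omega
          omega
      · -- genuine step from b to b + 1
        have hbb : c + 1 ≤ b := by omega
        obtain ⟨m, hm1, hm2, hmf, hmq, hmmin⟩ := ihb hbb (by omega)
        have hsplit : PySem.List.pyRange ((c : Int) + 1) ((b + 1 : Nat) : Int) 1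
            = PySem.List.pyRange ((c : Int) + 1) (b : Int) 1 ++ [(b : Int)] := by
          rw [show ((b + 1 : Nat) : Int) = (b : Int) + 1 by push_cast; ring]
          exact PySem.List.pyRange_one_succ_right (by exact_mod_cast hbb)
        rw [hsplit]
        by_cases hcond : PySem.List.pyGetD s (c : Int) ' ' < PySem.List.pyGetD s (b : Int) ' ' ∧
            PySem.List.pyGetD s (b : Int) ' ' ≤ PySem.List.pyGetD s m ' '
        · refine ⟨(b : Int), by exact_mod_cast hbb, by exact_mod_cast hble, ?_, hcond.1, ?_⟩
          · rw [List.foldl_append, hmf]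
            simp only [List.foldl_cons, List.foldl_nil]
            rw [if_pos hcond]
          · intro j hj1 hj2 hjq
            have : j < (b : Int) ∨ j = (b : Int) := by
              push_cast at hj2; omega
            rcases this with hlt | rfl
            · exact le_trans hcond.2 (hmmin j hj1 hlt hjq)
            · exact le_refl _
        · refine ⟨m, hm1, hm2, ?_, hmq, ?_⟩
          · rw [List.foldl_append, hmf]
            simp only [List.foldl_cons, List.foldl_nil]
            rw [if_neg hcond]
          · intro j hj1 hj2 hjq
            have : j < (b : Int) ∨ j = (b : Int) := by
              push_cast at hj2; omega
            rcases this with hlt | rfl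
            · exact hmmin j hj1 hlt hjq
            · have : ¬ PySem.List.pyGetD s (b : Int) ' ' ≤ PySem.List.pyGetD s m ' ' := by
                intro hle; exact hcond ⟨hjq, hle⟩
              exact le_of_lt (lt_of_not_ge this)
  obtain ⟨m, hm1, hm2, hmf, hmq, hmmin⟩ := main s.length (by omega) (le_refl _)
  exact ⟨m, hm1, hm2, hmf, hmq, fun j hj1 hj2 hjq => hmmin j hj1 (by exact_mod_cast hj2) hjq⟩

-- count of a counting-sort expansion
theorem pvCountFlatMapReplicate (ks : List Char) (hnd : ks.Nodup) (g : Char → Nat) (x : Char) :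
    (ks.flatMap (fun c => List.replicate (g c) c)).count x = if x ∈ ks then g x else 0 := by
  induction ks with
  | nil => simp
  | cons k t ih =>
    simp only [List.flatMap_cons, List.count_append, List.count_replicate]
    rcases List.nodup_cons.mp hnd with ⟨hk, hnt⟩
    by_cases hxk : x = k
    · subst hxk
      simp [ih hnt, hk]
    · simp [ih hnt, Ne.symm hxk, hxk]

-- a counting-sort expansion over strictly increasing keys is sorted
theorem pvPairwiseFlatMapReplicate (ks : List Char) (h : ks.Pairwise (· < ·)) (g : Char → Nat) :
    (ks.flatMap (fun c => List.replicate (g c) c)).Pairwise (· ≤ ·) := by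
  induction ks with
  | nil => simp
  | cons k t ih =>
    rcases List.pairwise_cons.mp h with ⟨hk, ht⟩
    simp only [List.flatMap_cons]
    rw [List.pairwise_append]
    refine ⟨List.pairwise_replicate.mpr (by simp), ih ht, ?_⟩
    intro x hx y hy
    have hxk : x = k := List.eq_of_mem_replicate hx
    rcases List.mem_flatMap.mp hy with ⟨c, hc, hyc⟩
    have hyk : y = c := List.eq_of_mem_replicate hyc
    subst hxk; subst hyk
    exact le_of_lt (hk _ hc)

-- the specialisation of the frozen fold to port A's pivot predicate
theorem pvFoldlFreezeS (s : List Char) (l : List Int) :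
    l.foldl
      (fun acc i =>
        match acc with
        | some j => some j
        | none =>
          if PySem.List.pyGetD s i ' ' < PySem.List.pyGetD s (i + 1) ' ' then some i else none) none
      = l.find? (fun i => decide (PySem.List.pyGetD s i ' ' < PySem.List.pyGetD s (i + 1) ' ')) :=
  pvFoldlFreeze (p := fun i => PySem.List.pyGetD s i ' ' < PySem.List.pyGetD s (i + 1) ' ') l

-- the heart of the equivalence: the two ports agree on every input
theorem pvCore (n : Int) : next_greater_element_iii n = next_greater_element_iii_alt n := by
  simp only [next_greater_element_iii, next_greater_element_iii_alt]
  generalize PySem.Int.toChars n = s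
  by_cases h0 : s = []
  · subst h0; rfl
  have hL : 0 < s.length := List.length_pos_iff.mpr h0
  rw [if_neg h0, if_neg (by omega : ¬ s.length = 0)]
  rw [pvFoldlFreezeS]
  rw [show ((s.length : Int) - 2) = ((s.length - 1 : Nat) : Int) - 1 by omega]
  rw [pvPivotBridge]
  by_cases hw : pivotWalk s (s.length - 1) = 0
  · rw [hw]; simp
  obtain ⟨c, hc⟩ : ∃ c : Nat, pivotWalk s (s.length - 1) = c + 1 :=
    ⟨pivotWalk s (s.length - 1) - 1, by omega⟩
  rw [hc, if_neg (Nat.succ_ne_zero c), if_neg (Nat.succ_ne_zero c)]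
  rw [show ((c + 1 : Nat) : Int) - 1 = (c : Int) by push_cast; ring]
  simp only []
  -- facts about the pivot position
  have hfind : (PySem.List.pyRange (((s.length - 1 : Nat) : Int) - 1) (-1) (-1)).find?
      (fun i => decide (PySem.List.pyGetD s i ' ' < PySem.List.pyGetD s (i + 1) ' '))
      = some (c : Int) := by
    rw [pvPivotBridge, hc, if_neg (Nat.succ_ne_zero c)]
    congr 1
    push_cast; ring
  have hasc : PySem.List.pyGetD s (c : Int) ' ' < PySem.List.pyGetD s ((c : Int) + 1) ' ' := by
    simpa using List.find?_some hfind
  have hmem := List.mem_of_find?_eq_some hfind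
  rw [PySem.List.mem_pyRange_neg_one] at hmem
  have hcend : c + 1 < s.length := by omega
  obtain ⟨m, hm1, hm2, hmf, hmq, hmmin⟩ := pvMinNextSpec s c hcend hasc
  obtain ⟨mm, rfl⟩ : ∃ mm : Nat, m = (mm : Int) := ⟨m.toNat, by omega⟩
  rw [hmf]
  -- B-side normalisations: slices to drop/take, the counting loop to Dict.counter
  rw [PySem.List.slice_from_natCast, PySem.Dict.foldl_insert_getD_add_one_eq_counter,
    PySem.List.slice_to_natCast]
  -- A-side: both pySetD positions are nonnegative
  simp only [PySem.List.pySetD_natCast]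
  rw [show ((c : Int) + 1) = ((c + 1 : Nat) : Int) by push_cast; ring]
  rw [PySem.List.slice_from_natCast, PySem.List.slice_to_natCast]
  set pv := PySem.List.pyGetD s (c : Int) ' ' with hpv
  set sfx := List.drop (c + 1) s with hsfx
  -- the element s[c+1] witnesses that the filtered key list is nonempty
  have hc1elem : PySem.List.pyGetD s ((c : Int) + 1) ' ' = s[c + 1]'hcend := by
    rw [show ((c : Int) + 1) = ((c + 1 : Nat) : Int) by push_cast; ring,
      PySem.List.pyGetD_natCast, List.getD_eq_getElem]
  have hmemc1 : s[c + 1]'hcend ∈ sfx := by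
    refine List.mem_iff_getElem?.mpr ⟨0, ?_⟩
    rw [hsfx, List.getElem?_drop]
    show s[c + 1]? = some (s[c + 1]'hcend)
    rw [List.getElem?_eq_getElem hcend]
  have hKmem : ∀ y, y ∈ (PySem.Dict.counter sfx).keys ↔ y ∈ sfx := by
    intro y; rw [PySem.Dict.keys_counter]; exact PySem.Set.mem_ofList _ _
  obtain ⟨succ, hminEq⟩ : ∃ y, PySem.List.min?
      (List.filter (fun x => decide (pv < x)) (PySem.Dict.counter sfx).keys) (fun x => x)
      = some y := by
    cases hm0 : PySem.List.min?
        (List.filter (fun x => decide (pv < x)) (PySem.Dict.counter sfx).keys) (fun x => x) with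
    | some y => exact ⟨y, rfl⟩
    | none =>
      exfalso
      have hnil := (PySem.List.min?_eq_none_iff _ _).mp hm0
      have hin : s[c + 1]'hcend ∈ List.filter (fun x => decide (pv < x))
          (PySem.Dict.counter sfx).keys := by
        refine List.mem_filter.mpr ⟨(hKmem _).mpr hmemc1, ?_⟩
        simp only [decide_eq_true_eq]
        rw [← hc1elem]
        exact hasc
      rw [hnil] at hin
      exact List.not_mem_nil hin
  rw [hminEq]
  simp only []
  -- facts about the successor digit
  have hsuccsfx : succ ∈ sfx := (hKmem succ).mp (List.mem_filter.mp (PySem.List.min?_mem hminEq)).1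
  have hpvsucc : pv < succ := by
    have := (List.mem_filter.mp (PySem.List.min?_mem hminEq)).2
    simpa using this
  have hsmin : ∀ y ∈ sfx, pv < y → succ ≤ y := by
    intro y hy hlt
    exact PySem.List.min?_isMin hminEq y (List.mem_filter.mpr ⟨(hKmem y).mpr hy, by simpa using hlt⟩)
  have hmmlt : mm < s.length := by omega
  have hmmge : c + 1 ≤ mm := by omega
  have hmval : PySem.List.pyGetD s (mm : Int) ' ' = s[mm]'hmmlt := by
    rw [PySem.List.pyGetD_natCast, List.getD_eq_getElem]
  have hsmm_mem : s[mm]'hmmlt ∈ sfx := by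
    refine List.mem_iff_getElem?.mpr ⟨mm - (c + 1), ?_⟩
    rw [hsfx, List.getElem?_drop, show c + 1 + (mm - (c + 1)) = mm by omega,
      List.getElem?_eq_getElem hmmlt]
  -- the value A swaps in is exactly B's successor digit
  have hvm : PySem.List.pyGetD s (mm : Int) ' ' = succ := by
    refine le_antisymm ?_ ?_
    · obtain ⟨k, hk, hke⟩ := List.mem_iff_getElem.mp hsuccsfx
      have hklen : c + 1 + k < s.length := by
        rw [hsfx, List.length_drop] at hk; omega
      have hke2 : s[c + 1 + k]'hklen = succ := by
        rw [← hke]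
        exact (List.getElem_drop).symm
      have hjval : PySem.List.pyGetD s ((c + 1 + k : Nat) : Int) ' ' = succ := by
        rw [PySem.List.pyGetD_natCast, List.getD_eq_getElem]
        exact hke2
      have := hmmin ((c + 1 + k : Nat) : Int) (by push_cast; omega) (by push_cast; omega)
        (by rw [hjval]; exact hpvsucc)
      rw [hjval] at this
      exact this
    · have := hsmin _ hsmm_mem (by rw [← hmval]; exact hmq)
      rw [hmval]
      exact this
  rw [hvm]
  -- A's prefix equals B's prefix
  have hpre : List.take (c + 1) ((s.set c succ).set mm pv) = List.take c s ++ [succ] := by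
    rw [List.take_set_of_le (by omega : c + 1 ≤ mm), List.take_set,
      List.take_succ_eq_append_getElem (by omega : c < s.length), List.set_append]
    simp [List.length_take, Nat.min_eq_left (by omega : c ≤ s.length)]
  have hsufA : List.drop (c + 1) ((s.set c succ).set mm pv) = sfx.set (mm - (c + 1)) pv := by
    rw [List.drop_set, if_neg (by omega : ¬ mm < c + 1),
      List.drop_set_of_lt (by omega : c < c + 1), hsfx]
  rw [hpre, hsufA]
  set cnt2 := ((PySem.Dict.counter sfx).insert succ ((PySem.Dict.counter sfx).getD succ 0 - 1)).insert pv
      (((PySem.Dict.counter sfx).insert succ ((PySem.Dict.counter sfx).getD succ 0 - 1)).getD pv 0 + 1)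
    with hcnt2
  -- the entries of B's adjusted counter
  have hg_pv : cnt2.getD pv 0 = (sfx.count pv : Int) + 1 := by
    rw [hcnt2, PySem.Dict.getD_insert_self,
      PySem.Dict.getD_insert_of_ne _ _ _ (ne_of_lt hpvsucc), PySem.Dict.getD_counter]
  have hg_succ : cnt2.getD succ 0 = (sfx.count succ : Int) - 1 := by
    rw [hcnt2, PySem.Dict.getD_insert_of_ne _ _ _ (ne_of_gt hpvsucc), PySem.Dict.getD_insert_self,
      PySem.Dict.getD_counter]
  have hg_other : ∀ x, x ≠ pv → x ≠ succ → cnt2.getD x 0 = (sfx.count x : Int) := by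
    intro x hx1 hx2
    rw [hcnt2, PySem.Dict.getD_insert_of_ne _ _ _ hx1, PySem.Dict.getD_insert_of_ne _ _ _ hx2,
      PySem.Dict.getD_counter]
  have hkeys1 : ((PySem.Dict.counter sfx).insert succ ((PySem.Dict.counter sfx).getD succ 0 - 1)).keys
      = (PySem.Dict.counter sfx).keys :=
    PySem.Dict.keys_insert_of_contains _ _
      ((PySem.Dict.contains_iff_mem_keys _ _).mpr ((hKmem succ).mpr hsuccsfx))
  have hk2mem : ∀ x, x ∈ cnt2.keys ↔ (x ∈ sfx ∨ x = pv) := by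
    intro x
    by_cases hpvk : pv ∈ sfx
    · rw [hcnt2, PySem.Dict.keys_insert_of_contains _ _
        ((PySem.Dict.contains_iff_mem_keys _ _).mpr (by rw [hkeys1]; exact (hKmem pv).mpr hpvk)),
        hkeys1, hKmem]
      exact ⟨Or.inl, fun h => h.elim id (fun he => he ▸ hpvk)⟩
    · have hct : ((PySem.Dict.counter sfx).insert succ
          ((PySem.Dict.counter sfx).getD succ 0 - 1)).contains pv = false := by
        by_contra hct
        have : pv ∈ sfx := (hKmem pv).mp (by
          rw [← hkeys1]
          exact (PySem.Dict.contains_iff_mem_keys _ _).mp (Bool.not_eq_false _ ▸ hct))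
        exact hpvk this
      rw [hcnt2, PySem.Dict.keys_insert_of_not_contains _ _ hct, List.mem_append, hkeys1, hKmem]
      simp
  have hk2nd : cnt2.keys.Nodup := by
    rw [hcnt2]
    exact PySem.Dict.nodup_keys_insert _ _ _
      (PySem.Dict.nodup_keys_insert _ _ _ (PySem.Dict.nodup_keys_counter _))
  -- the sorted key list
  have hksnd : (PySem.List.sorted cnt2.keys (fun x => x) false).Nodup :=
    (PySem.List.sorted_perm cnt2.keys _ false).symm.nodup hk2nd
  have hksmem : ∀ x, x ∈ PySem.List.sorted cnt2.keys (fun x => x) false ↔ x ∈ cnt2.keys :=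
    fun x => PySem.List.mem_sorted _ _ _ x
  have hkslt : (PySem.List.sorted cnt2.keys (fun x => x) false).Pairwise (· < ·) := by
    have h1 : (PySem.List.sorted cnt2.keys (fun x => x) false).Pairwise (· ≤ ·) := by
      simpa using PySem.List.sorted_pairwise cnt2.keys (fun x => x)
    exact (h1.and hksnd).imp (fun h => lt_of_le_of_ne h.1 h.2)
  -- index of the swapped position inside the suffix
  have hk0 : mm - (c + 1) < sfx.length := by
    rw [hsfx, List.length_drop]; omega
  have hsmmv : s[mm]'hmmlt = succ := by rw [← hmval]; exact hvm
  have hsfxk0 : sfx[mm - (c + 1)]'hk0 = succ := by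
    have h := List.getElem_drop (xs := s) (i := c + 1) (j := mm - (c + 1))
      (h := by rw [List.length_drop]; omega)
    calc sfx[mm - (c + 1)]'hk0 = s[c + 1 + (mm - (c + 1))]'(by omega) := h
      _ = s[mm]'hmmlt := by congr 1; omega
      _ = succ := hsmmv
  have hcntsucc : 1 ≤ sfx.count succ := List.count_pos_iff.mpr hsuccsfx
  -- B's rebuilt tail is a sorted rearrangement of A's swapped suffix
  have hperm : ((PySem.List.sorted cnt2.keys (fun x => x) false).flatMap
      (fun x => List.replicate (cnt2.getD x 0).toNat x)).Perm (sfx.set (mm - (c + 1)) pv) := by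
    rw [List.perm_iff_count]
    intro x
    rw [pvCountFlatMapReplicate _ hksnd _ x, List.count_set hk0, hsfxk0]
    by_cases hx1 : x = pv
    · subst hx1
      rw [if_pos ((hksmem _).mpr ((hk2mem _).mpr (Or.inr rfl))), hg_pv]
      have ht : ((sfx.count pv : Int) + 1).toNat = sfx.count pv + 1 := by omega
      rw [ht]
      simp [beq_iff_eq, ne_of_gt hpvsucc]
    · by_cases hx2 : x = succ
      · rw [hx2]
        rw [if_pos ((hksmem _).mpr ((hk2mem _).mpr (Or.inl hsuccsfx))), hg_succ]
        have ht : ((sfx.count succ : Int) - 1).toNat = sfx.count succ - 1 := by omega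
        rw [ht]
        simp [beq_iff_eq, ne_of_lt hpvsucc]
      · by_cases hx3 : x ∈ sfx
        · rw [if_pos ((hksmem _).mpr ((hk2mem _).mpr (Or.inl hx3))), hg_other x hx1 hx2]
          simp [beq_iff_eq, Ne.symm hx1, Ne.symm hx2]
        · rw [if_neg (fun hmem => (((hk2mem x).mp ((hksmem x).mp hmem)).elim hx3 hx1))]
          have hcz : sfx.count x = 0 := List.count_eq_zero.mpr hx3
          simp [beq_iff_eq, Ne.symm hx1, Ne.symm hx2, hcz]
  have hpair := pvPairwiseFlatMapReplicate _ hkslt (fun x => (cnt2.getD x 0).toNat)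
  have htail := PySem.List.sorted_id_eq_of_perm_of_pairwise (sfx.set (mm - (c + 1)) pv) _ hperm hpair
  rw [htail]


-- ===== VERDICT (by name: the statement is the Claim_ definition above) =====
theorem next_greater_element_iii_spec : Claim_equal_next_greater_element_iii := by
  intro n _ _
  unfold Spec_next_greater_element_iii
  exact pvCore n
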